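-- pv_equiv track=rewrite | github.com/robertgreenhalgh/stand | build_database.py | comp_tax
-- ===== SOURCE A (Python) =====
-- def format_subrank(parent_rank, number):
--     """Formats the name for ambiguous subranks based on their parent and
--        number."""
--     return '{}_Subrank_{}'.format(parent_rank, number)
--
-- def comp_tax(rank_list, lineage):
--     """Fills out a complete taxonomy for a sequence's lineage."""
--     tax = []
--     lineage_dict = {}
--     prev_rank = ['root', 0]
--     for rank, rank_name in lineage:
--         if rank == 'no_rank':
--             prev_rank[1] += 1
--             rank = format_subrank(*prev_rank)
--             lineage_dict[rank] = rank_name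
--         else:
--             prev_rank = [rank, 0]
--             lineage_dict[rank] = rank_name
--     rank_indices = [rank_list.index(r) for r in lineage_dict if r in rank_list]
--     lowest_rank = max(rank_indices) if rank_indices else -1
--     for rank_idx, rank in enumerate(rank_list):
--         if rank in lineage_dict:
--             name = lineage_dict[rank]
--         else:
--             if rank_idx > lowest_rank:
--                 name = 'Unknown'
--             else:
--                 name = 'Unclassified'
--         tax.append((rank, name))
--     return tax
-- ===== SOURCE B (Python) =====
-- def format_subrank(parent_rank, number):
--     """Formats the name for ambiguous subranks based on their parent and
--        number."""
--     return '{}_Subrank_{}'.format(parent_rank, number)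
--
-- def comp_tax(rank_list, lineage):
--     """Fills out a complete taxonomy for a sequence's lineage."""
--     lineage_dict = {}
--     prev_rank = ['root', 0]
--     for rank, rank_name in lineage:
--         if rank == 'no_rank':
--             prev_rank[1] += 1
--             rank = format_subrank(*prev_rank)
--             lineage_dict[rank] = rank_name
--         else:
--             prev_rank = [rank, 0]
--             lineage_dict[rank] = rank_name
--     # One backward pass: a rank below every classified rank is 'Unknown',
--     # otherwise 'Unclassified'; no index table, no max scan.
--     rev_tax = []
--     seen_present = False
--     for rank in reversed(rank_list):
--         if rank in lineage_dict:
--             rev_tax.append((rank, lineage_dict[rank]))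
--             seen_present = True
--         elif seen_present:
--             rev_tax.append((rank, 'Unclassified'))
--         else:
--             rev_tax.append((rank, 'Unknown'))
--     rev_tax.reverse()
--     return rev_tax
-- ===== Notes on version B (the rewrite author's own statement) =====
-- stated objective: simpler
-- what changed: The index table built with repeated rank_list.index calls and the separate max scan are removed: one backward pass over rank_list with a running seen_present flag decides Unknown vs Unclassified directly.
import Mathlib
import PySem

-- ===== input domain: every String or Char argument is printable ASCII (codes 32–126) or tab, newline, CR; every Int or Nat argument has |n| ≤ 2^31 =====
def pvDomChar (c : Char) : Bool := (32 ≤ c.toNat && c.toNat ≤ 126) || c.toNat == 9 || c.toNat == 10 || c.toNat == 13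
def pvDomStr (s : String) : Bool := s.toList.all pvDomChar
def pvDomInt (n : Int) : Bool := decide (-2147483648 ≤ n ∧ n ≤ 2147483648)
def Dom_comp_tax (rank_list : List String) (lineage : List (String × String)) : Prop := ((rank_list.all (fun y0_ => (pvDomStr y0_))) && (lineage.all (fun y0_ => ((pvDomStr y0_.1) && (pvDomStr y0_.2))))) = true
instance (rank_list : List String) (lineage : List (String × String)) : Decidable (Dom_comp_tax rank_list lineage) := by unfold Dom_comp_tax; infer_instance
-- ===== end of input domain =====

-- B replaces A's index table (repeated rank_list.index) and max scan by a single
-- backward pass over rank_list with a running seen_present flag (objective: simpler).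

-- ===== PORT A =====
-- '{}_Subrank_{}'.format(parent_rank, number)
def format_subrank (parent_rank : String) (number : Int) : String :=
  parent_rank ++ "_Subrank_" ++ PySem.Int.toStr number

-- the first loop of comp_tax (textually identical in A and in B): builds lineage_dict
def buildLineageDict (lineage : List (String × String)) : PySem.Dict String String :=
  (lineage.foldl
    (fun (st : PySem.Dict String String × String × Int) p =>
      let d := st.1; let prev_rank := st.2
      if p.1 == "no_rank" then
        let n := prev_rank.2 + 1
        let rank := format_subrank prev_rank.1 n
        (d.insert rank p.2, prev_rank.1, n)
      else
        (d.insert p.1 p.2, p.1, 0))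
    (PySem.Dict.empty, "root", 0)).1

-- [rank_list.index(r) for r in lineage_dict if r in rank_list]
def rankIndices (d : PySem.Dict String String) (rank_list : List String) : List Nat :=
  d.keys.filterMap (fun r => if rank_list.contains r then PySem.List.index? rank_list r else none)

-- max(rank_indices) if rank_indices else -1
def lowestRank (d : PySem.Dict String String) (rank_list : List String) : Int :=
  match PySem.List.max? (rankIndices d rank_list) (fun y => y) with
  | some m => (m : Int)
  | none => -1

-- the rest of A: forward classification loop over enumerate(rank_list)
def classifyA (d : PySem.Dict String String) (rank_list : List String) : List (String × String) :=
  let lowest_rank := lowestRank d rank_list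
  (PySem.List.enumerate rank_list 0).foldl
    (fun tax p =>
      let name :=
        if d.contains p.2 then d.getD p.2 ""
        else if p.1 > lowest_rank then "Unknown" else "Unclassified"
      tax ++ [(p.2, name)]) []

def comp_tax (rank_list : List String) (lineage : List (String × String)) : List (String × String) :=
  classifyA (buildLineageDict lineage) rank_list

-- ===== PORT B =====
-- the rest of B: one backward pass with a seen_present flag, then reverse
def classifyB (d : PySem.Dict String String) (rank_list : List String) : List (String × String) :=
  (rank_list.reverse.foldl
    (fun (st : List (String × String) × Bool) rank =>
      if d.contains rank then (st.1 ++ [(rank, d.getD rank "")], true)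
      else if st.2 then (st.1 ++ [(rank, "Unclassified")], st.2)
      else (st.1 ++ [(rank, "Unknown")], st.2))
    ([], false)).1.reverse

def comp_tax_alt (rank_list : List String) (lineage : List (String × String)) : List (String × String) :=
  classifyB (buildLineageDict lineage) rank_list

-- ===== PRECONDITION & SPEC =====
-- Pre_ excludes rank lists with duplicate ranks: there A classifies the gap ranks
-- against the accidental FIRST index of a duplicated rank while B uses the positions
-- themselves — a corner no caller of a taxonomy rank list specifies, so both values
-- are defensible.
def Pre_comp_tax (rank_list : List String) (lineage : List (String × String)) : Prop :=
  rank_list.Nodup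

instance (rank_list : List String) (lineage : List (String × String)) : Decidable (Pre_comp_tax rank_list lineage) := by unfold Pre_comp_tax; infer_instance

def pvWitness_comp_tax : List String × (List (String × String)) :=
  (["phylum", "genus", "species"], [("genus", "Felis")])

def Spec_comp_tax (rank_list : List String) (lineage : List (String × String)) (out : List (String × String)) : Prop := out = comp_tax_alt rank_list lineage
instance (rank_list : List String) (lineage : List (String × String)) (out : List (String × String)) : Decidable (Spec_comp_tax rank_list lineage out) := by unfold Spec_comp_tax; infer_instance

-- ===== CLAIM (what is proved, stated in full; the proofs are below) =====
def Claim_equal_comp_tax : Prop := ∀ (rank_list : List String) (lineage : List (String × String)), Dom_comp_tax rank_list lineage → Pre_comp_tax rank_list lineage → Spec_comp_tax rank_list lineage (comp_tax rank_list lineage)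

-- ===== LEMMAS AND PROOFS =====

-- structural recursion equivalent to B's backward loop (r gets the flag of its suffix)
def bspec (d : PySem.Dict String String) : List String → List (String × String) × Bool
  | [] => ([], false)
  | r :: rest =>
    let t := bspec d rest
    if d.contains r then ((r, d.getD r "") :: t.1, true)
    else if t.2 then ((r, "Unclassified") :: t.1, t.2)
    else ((r, "Unknown") :: t.1, t.2)

theorem foldl_append_map {α β : Type} (l : List α) (g : α → β) (acc : List β) :
    l.foldl (fun t x => t ++ [g x]) acc = acc ++ l.map g := by
  induction l generalizing acc with
  | nil => simp
  | cons x xs ih => simp [List.foldl_cons, ih]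

theorem classifyB_eq_bspec (d : PySem.Dict String String) (l : List String) :
    classifyB d l = (bspec d l).1 := by
  have key : ∀ (l : List String),
      (l.reverse.foldl
        (fun (st : List (String × String) × Bool) rank =>
          if d.contains rank then (st.1 ++ [(rank, d.getD rank "")], true)
          else if st.2 then (st.1 ++ [(rank, "Unclassified")], st.2)
          else (st.1 ++ [(rank, "Unknown")], st.2))
        ([], false)) = ((bspec d l).1.reverse, (bspec d l).2) := by
    intro l
    induction l with
    | nil => simp [bspec]
    | cons r rest ih =>
      rw [List.reverse_cons, List.foldl_append, ih]
      simp only [List.foldl_cons, List.foldl_nil, bspec]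
      by_cases h : d.contains r = true <;>
        by_cases h2 : (bspec d rest).2 = true <;>
        simp [h, h2]
  unfold classifyB
  rw [key]
  simp

theorem bspec_flag (d : PySem.Dict String String) (l : List String) :
    (bspec d l).2 = l.any (fun r => d.contains r) := by
  induction l with
  | nil => simp [bspec]
  | cons r rest ih =>
    simp only [bspec, List.any_cons]
    by_cases h : d.contains r = true <;>
      by_cases h2 : (bspec d rest).2 = true <;>
      simp [h, h2, ← ih]

-- core: A's indexed classification agrees with B's backward flag, given the
-- bridge between "index above the max present index" and "no present rank in the suffix"
theorem enum_map_eq_bspec (d : PySem.Dict String String) (L : Int) :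
    ∀ (l : List String) (i0 : Int),
    (∀ i : Nat, (i0 + i > L ↔ ¬ ((l.drop i).any (fun r => d.contains r) = true))) →
    (PySem.List.enumerate l i0).map
      (fun p => (p.2, if d.contains p.2 then d.getD p.2 ""
                      else if p.1 > L then "Unknown" else "Unclassified"))
      = (bspec d l).1 := by
  intro l
  induction l with
  | nil => intro i0 _; simp [bspec]
  | cons r rest ih =>
    intro i0 H
    have Hrest : ∀ i : Nat, ((i0 + 1) + (i : Int) > L ↔ ¬ ((rest.drop i).any (fun r => d.contains r) = true)) := by
      intro i
      have h := H (i + 1)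
      rw [List.drop_succ_cons] at h
      push_cast at h ⊢
      constructor
      · intro hh; exact h.mp (by linarith)
      · intro hh; have := h.mpr hh; linarith
    have H0 := H 0
    simp only [List.drop_zero, List.any_cons, Nat.cast_zero, add_zero] at H0
    rw [PySem.List.enumerate_cons, List.map_cons, ih (i0 + 1) Hrest]
    simp only [bspec]
    by_cases h : d.contains r = true
    · simp [h]
    · have hflag : (bspec d rest).2 = rest.any (fun r => d.contains r) := bspec_flag d rest
      by_cases h2 : rest.any (fun r => d.contains r) = true
      · have hle : ¬ (i0 > L) := by
          intro hgt
          exact (H0.mp hgt) (by simp [h, h2])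
        simp [h, hflag, h2, hle]
      · have hgt : i0 > L := by
          apply H0.mpr
          simp [h, h2]
        simp [h, hflag, h2, hgt]

theorem any_drop_iff {α : Type} (l : List α) (i : Nat) (p : α → Bool) :
    (l.drop i).any p = true ↔ ∃ j, ∃ h : j < l.length, i ≤ j ∧ p l[j] = true := by
  rw [List.any_eq_true]
  constructor
  · rintro ⟨x, hx, hp⟩
    obtain ⟨k, hk, hxk⟩ := List.getElem_of_mem hx
    rw [List.getElem_drop] at hxk
    refine ⟨i + k, by have := List.length_drop (l := l) (i := i) ▸ hk; omega, by omega, ?_⟩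
    · rw [hxk]; exact hp
  · rintro ⟨j, hj, hij, hp⟩
    refine ⟨l[j], ?_, hp⟩
    have hjlt : j - i < (l.drop i).length := by simp [List.length_drop]; omega
    have : (l.drop i)[j - i] = l[j] := by
      rw [List.getElem_drop]
      congr 1
      omega
    rw [← this]
    exact List.getElem_mem hjlt

theorem mem_rankIndices_iff (d : PySem.Dict String String) (l : List String)
    (hnd : l.Nodup) (j : Nat) :
    j ∈ rankIndices d l ↔ ∃ h : j < l.length, d.contains l[j] = true := by
  unfold rankIndices
  rw [List.mem_filterMap]
  constructor
  · rintro ⟨r, hr, hsome⟩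
    by_cases hc : l.contains r = true
    · rw [if_pos hc] at hsome
      obtain ⟨hk, hget, -⟩ := PySem.List.getElem_of_index?_eq_some hsome
      refine ⟨hk, ?_⟩
      rw [hget, PySem.Dict.contains_iff_mem_keys]
      exact hr
    · rw [if_neg hc] at hsome; cases hsome
  · rintro ⟨h, hc⟩
    refine ⟨l[j], ?_, ?_⟩
    · rw [← PySem.Dict.contains_iff_mem_keys]; exact hc
    · have hmem : l[j] ∈ l := List.getElem_mem h
      rw [if_pos (by simp)]
      have hs : (PySem.List.index? l l[j]).isSome := by
        rw [PySem.List.index?_isSome_iff]; exact hmem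
      obtain ⟨k, hk⟩ := Option.isSome_iff_exists.mp hs
      obtain ⟨hklt, hget, -⟩ := PySem.List.getElem_of_index?_eq_some hk
      have : k = j := by
        apply (List.Nodup.getElem_inj_iff hnd).mp hget
      rw [hk, this]

-- the bridge itself, from Nodup
theorem bridge (d : PySem.Dict String String) (l : List String) (hnd : l.Nodup) :
    ∀ i : Nat, ((0 : Int) + i > lowestRank d l ↔
      ¬ ((l.drop i).any (fun r => d.contains r) = true)) := by
  intro i
  rw [zero_add, any_drop_iff]
  unfold lowestRank
  rcases hmax : PySem.List.max? (rankIndices d l) (fun y => y) with _ | m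
  · -- empty: L = -1, no present rank anywhere
    have hnil : rankIndices d l = [] := (PySem.List.max?_eq_none_iff _ _).mp hmax
    simp only []
    constructor
    · rintro - ⟨j, hj, -, hc⟩
      have : j ∈ rankIndices d l := (mem_rankIndices_iff d l hnd j).mpr ⟨hj, hc⟩
      rw [hnil] at this
      cases this
    · intro _
      omega
  · have hm : m ∈ rankIndices d l := PySem.List.max?_mem hmax
    obtain ⟨hmlt, hmc⟩ := (mem_rankIndices_iff d l hnd m).mp hm
    simp only []
    constructor
    · rintro hgt ⟨j, hj, hij, hc⟩
      have hjm : (j : Nat) ≤ m := PySem.List.max?_isMax hmax j ((mem_rankIndices_iff d l hnd j).mpr ⟨hj, hc⟩)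
      have : (j : Int) ≤ (m : Int) := by exact_mod_cast hjm
      have : (i : Int) ≤ j := by exact_mod_cast hij
      omega
    · intro hno
      by_contra hle
      push Not at hle
      have him : i ≤ m := by exact_mod_cast hle
      exact hno ⟨m, hmlt, him, hmc⟩

-- ===== VERDICT (by name: the statement is the Claim_ definition above) =====
theorem comp_tax_spec : Claim_equal_comp_tax := by
  intro rank_list lineage _ hpre
  unfold Spec_comp_tax comp_tax comp_tax_alt
  set d := buildLineageDict lineage with hd
  unfold classifyA
  rw [foldl_append_map, List.nil_append,
      enum_map_eq_bspec d (lowestRank d rank_list) rank_list 0 (bridge d rank_list hpre),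
      ← classifyB_eq_bspec]
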